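-- pv_equiv track=rewrite | github.com/time4ruin/kjh | arm/kj16_interprocess_pmu/run.py | _emit_nops
-- ===== SOURCE A (Python) =====
-- MAX_NOP_PER_BLOCK = 8000   # NOP_REPEAT 한 번에 최대
--
-- def _emit_nops(n_value: int) -> str:
--     """
--     NOP_REPEAT(n)를 여러 개로 쪼개서 생성 (C 구문)
--     """
--     n_value = max(0, int(n_value))
--     if n_value <= 0:
--         return "\n    "
--
--     blocks = []
--     remaining = n_value
--     while remaining > 0:
--         chunk = min(remaining, MAX_NOP_PER_BLOCK)
--         blocks.append(f"NOP_REPEAT({chunk});")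
--         remaining -= chunk
--
--     return "\n    " + "\n    ".join(blocks) + "\n"
-- ===== SOURCE B (Python) =====
-- MAX_NOP_PER_BLOCK = 8000
--
-- def _emit_nops(n_value: int) -> str:
--     n_value = max(0, int(n_value))
--     if n_value <= 0:
--         return "\n    "
--     k, r = divmod(n_value, MAX_NOP_PER_BLOCK)
--     blocks = ["NOP_REPEAT(8000);"] * k
--     if r != 0:
--         blocks.append(f"NOP_REPEAT({r});")
--     return "\n    " + "\n    ".join(blocks) + "\n"
-- ===== Notes on version B (the rewrite author's own statement) =====
-- stated objective: simpler
-- what changed: Replaces the chunk-subtracting while loop with a closed-form divmod: k full 8000-blocks by list repetition plus one optional remainder block.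
import Mathlib
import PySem

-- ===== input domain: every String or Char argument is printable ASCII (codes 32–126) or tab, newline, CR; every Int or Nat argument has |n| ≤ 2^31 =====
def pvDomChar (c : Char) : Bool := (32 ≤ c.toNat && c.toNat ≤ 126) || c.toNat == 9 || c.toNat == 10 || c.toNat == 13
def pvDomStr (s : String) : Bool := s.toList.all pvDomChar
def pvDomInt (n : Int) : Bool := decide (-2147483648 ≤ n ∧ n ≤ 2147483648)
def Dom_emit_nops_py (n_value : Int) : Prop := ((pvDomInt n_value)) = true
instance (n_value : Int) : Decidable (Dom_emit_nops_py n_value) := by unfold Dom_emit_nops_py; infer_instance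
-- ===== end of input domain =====

-- B replaces A's chunk-subtracting while loop by a closed-form divmod (full blocks by
-- list repetition plus an optional remainder block); objective: simpler.

-- ===== PORT A =====
-- the while loop of A: repeatedly take chunk = min(remaining, 8000), append, subtract
def emitNopsLoopA (remaining : Int) (blocks : List String) : List String :=
  if h : remaining > 0 then
    let chunk := min remaining 8000
    emitNopsLoopA (remaining - chunk)
      (blocks ++ ["NOP_REPEAT(" ++ PySem.Int.toStr chunk ++ ");"])
  else blocks
termination_by remaining.toNat
decreasing_by omega

def emit_nops_py (n_value : Int) : String :=
  let n := max 0 n_value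
  if n ≤ 0 then "\n    "
  else "\n    " ++ String.intercalate "\n    " (emitNopsLoopA n []) ++ "\n"

-- ===== PORT B =====
def emit_nops_py_alt (n_value : Int) : String :=
  let n := max 0 n_value
  if n ≤ 0 then "\n    "
  else
    let k := PySem.Int.floordiv n 8000
    let r := PySem.Int.mod n 8000
    let blocks := List.replicate k.toNat "NOP_REPEAT(8000);"
    let blocks := if r ≠ 0 then blocks ++ ["NOP_REPEAT(" ++ PySem.Int.toStr r ++ ");"] else blocks
    "\n    " ++ String.intercalate "\n    " blocks ++ "\n"

-- ===== PRECONDITION & SPEC =====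
def Spec_emit_nops_py (n_value : Int) (out : String) : Prop := out = emit_nops_py_alt n_value
instance (n_value : Int) (out : String) : Decidable (Spec_emit_nops_py n_value out) := by unfold Spec_emit_nops_py; infer_instance

-- ===== CLAIM (what is proved, stated in full; the proofs are below) =====
def Claim_equal_emit_nops_py : Prop := ∀ (n_value : Int), Dom_emit_nops_py n_value → Spec_emit_nops_py n_value (emit_nops_py n_value)

-- ===== LEMMAS AND PROOFS =====

-- closed form of A's loop (in terms of Int.ediv/emod, valid since the arguments are positive)
theorem emitNopsLoopA_closed (fuel : Nat) : ∀ (r : Int), r.toNat ≤ fuel → 0 < r → ∀ bs,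
    emitNopsLoopA r bs =
      bs ++ List.replicate (r / 8000).toNat "NOP_REPEAT(8000);" ++
        (if r % 8000 ≠ 0 then ["NOP_REPEAT(" ++ PySem.Int.toStr (r % 8000) ++ ");"] else []) := by
  induction fuel with
  | zero => intro r hle hpos; omega
  | succ fuel ih =>
    intro r hle hpos bs
    unfold emitNopsLoopA
    simp only [hpos, dite_true]
    by_cases hbig : r > 8000
    · have hmin : min r 8000 = 8000 := by omega
      rw [hmin, ih (r - 8000) (by omega) (by omega)]
      have hdiv : (r / 8000).toNat = ((r - 8000) / 8000).toNat + 1 := by omega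
      have hmod : (r - 8000) % 8000 = r % 8000 := by omega
      rw [hdiv, hmod, List.replicate_succ]
      simp [show PySem.Int.toStr (8000:Int) = "8000" from by decide]
    · have hmin : min r 8000 = r := by omega
      rw [hmin]
      have hz : ¬ (r - r > 0) := by omega
      unfold emitNopsLoopA
      simp only [hz, dite_false]
      by_cases heq : r = 8000
      · subst heq; norm_num; decide
      · have hdiv : (r / 8000).toNat = 0 := by omega
        have hmod : r % 8000 = r := by omega
        rw [hdiv, hmod]
        simp [hpos.ne']

-- ===== VERDICT (by name: the statement is the Claim_ definition above) =====
theorem emit_nops_py_spec : Claim_equal_emit_nops_py := by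
  intro n_value _
  unfold Spec_emit_nops_py emit_nops_py emit_nops_py_alt
  by_cases h : max 0 n_value ≤ 0
  · simp [h]
  · have hpos : 0 < max 0 n_value := by omega
    simp only [h, if_false]
    rw [emitNopsLoopA_closed (max 0 n_value).toNat _ le_rfl hpos,
        PySem.Int.floordiv_eq_ediv_of_pos (by norm_num),
        PySem.Int.mod_eq_emod_of_pos (by norm_num)]
    by_cases hm : (max 0 n_value) % 8000 ≠ 0 <;> simp [hm]
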